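-- pv_equiv track=rewrite | github.com/caduuv/ifce.logcomp.projetopratico | restrictions_cnf.py | restriction1
-- ===== SOURCE A (Python) =====
-- def restriction1(rules_num, attributes):
--
--     and_list = []
--     for rule in range(0, rules_num):
--         lista_somentes = []
--         for attr in range(0, len(attributes)-1):
--             """
--             (A∧¬B∧¬C) ∨ (¬A∧B∧¬C) ∨ (¬A∧¬B∧C) in CNF is:
--             (¬A ∨ ¬B) ∧ (¬A ∨ ¬C) ∧ (B ∨ ¬C ∨ ¬A) ∧ (¬C ∨ A ∨ ¬B) ∧ (¬C ∨ ¬B) ∧ (B ∨ A ∨ C)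
--
--             3*Res + 3*TAM_Res*Reg + 1 - p
--             3*Res + Reg + 2 - p
--             3*Res + Reg + 3 - p
--
--             """
--             somente_um_interno = []
--             somente_um_interno.append(int(-1*( (3*attr)  +     (3*(len(attributes)-1)*rule)    +   1    )))
--             somente_um_interno.append(-1*( (3*attr)  +     (3*(len(attributes)-1)*rule)    +   2    ))
--             lista_somentes.append(somente_um_interno)
--             somente_um_interno = []
--             somente_um_interno.append(-1*( (3*attr)  +     (3*(len(attributes)-1)*rule)    +   1    ))
--             somente_um_interno.append(-1*( (3*attr)  +     (3*(len(attributes)-1)*rule)    +   3    ))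
--             lista_somentes.append(somente_um_interno)
--             somente_um_interno = []
--             somente_um_interno.append(-1*( (3*attr)  +     (3*(len(attributes)-1)*rule)    +   1    ))
--             somente_um_interno.append(( (3*attr)  +     (3*(len(attributes)-1)*rule)    +   2    ))
--             somente_um_interno.append(-1*( (3*attr)  +     (3*(len(attributes)-1)*rule)    +   3   ))
--             lista_somentes.append(somente_um_interno)
--             somente_um_interno = []
--             somente_um_interno.append(( (3*attr)  +     (3*(len(attributes)-1)*rule)    +   1    ))
--             somente_um_interno.append(-1*( (3*attr)  +     (3*(len(attributes)-1)*rule)    +   2    ))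
--             somente_um_interno.append(-1*( (3*attr)  +     (3*(len(attributes)-1)*rule)    +   3    ))
--             lista_somentes.append(somente_um_interno)
--             somente_um_interno = []
--             somente_um_interno.append(-1*( (3*attr)  +     (3*(len(attributes)-1)*rule)    +   2    ))
--             somente_um_interno.append(-1*( (3*attr)  +     (3*(len(attributes)-1)*rule)    +   3    ))
--             lista_somentes.append(somente_um_interno)
--             somente_um_interno = []
--             somente_um_interno.append(( (3*attr)  +     (3*(len(attributes)-1)*rule)    +   1    ))
--             somente_um_interno.append(( (3*attr)  +     (3*(len(attributes)-1)*rule)    +   2    ))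
--             somente_um_interno.append(( (3*attr)  +     (3*(len(attributes)-1)*rule)    +   3    ))
--             lista_somentes.append(somente_um_interno)
--
--         and_list = and_list+lista_somentes
--     return(and_list)
-- ===== SOURCE B (Python) =====
-- # Single flat pass over all (rule, attr) blocks, driven by a fixed table of
-- # six signed-offset clause patterns, instead of six duplicated hand-written
-- # blocks inside nested loops.
-- _PATTERNS = [[-1, -2], [-1, -3], [-1, 2, -3], [1, -2, -3], [-2, -3], [1, 2, 3]]
--
-- def restriction1(rules_num, attributes):
--     total = max(rules_num, 0) * max(len(attributes) - 1, 0)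
--     out = []
--     for k in range(total):
--         base = 3 * k
--         for pat in _PATTERNS:
--             out.append([(base + abs(o)) if o > 0 else -(base + abs(o)) for o in pat])
--     return out
-- ===== Notes on version B (the rewrite author's own statement) =====
-- stated objective: simpler
-- what changed: Replaces the nested rule/attr loops with six duplicated hand-written clause blocks by one flat loop over a single block index k (base = 3*k) driven by a fixed table of signed-offset clause patterns.
import Mathlib
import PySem

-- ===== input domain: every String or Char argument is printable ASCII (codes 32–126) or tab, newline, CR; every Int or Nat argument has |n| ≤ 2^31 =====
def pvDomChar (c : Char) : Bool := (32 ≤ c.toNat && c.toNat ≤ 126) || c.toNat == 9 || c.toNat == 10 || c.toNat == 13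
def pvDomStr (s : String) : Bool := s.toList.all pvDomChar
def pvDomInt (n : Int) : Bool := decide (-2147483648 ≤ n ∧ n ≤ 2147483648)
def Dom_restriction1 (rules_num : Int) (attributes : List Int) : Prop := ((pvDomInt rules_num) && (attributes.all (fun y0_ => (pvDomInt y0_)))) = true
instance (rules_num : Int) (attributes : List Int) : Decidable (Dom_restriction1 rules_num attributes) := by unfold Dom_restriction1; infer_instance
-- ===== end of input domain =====

-- B is a simpler, table-driven single flat loop computing the same CNF clause list; equivalence of return values is proved.

-- ===== PORT A =====
-- literal port of A: nested loops (rule, then attr), six appends per attr block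
def restriction1 (rules_num : Int) (attributes : List Int) : List (List Int) :=
  (PySem.List.pyRange 0 rules_num 1).foldl (fun and_list rule =>
    let lista_somentes :=
      (PySem.List.pyRange 0 ((attributes.length : Int) - 1) 1).foldl (fun ls attr =>
        ls ++ [[-(3*attr + 3*((attributes.length : Int)-1)*rule + 1),
                -(3*attr + 3*((attributes.length : Int)-1)*rule + 2)],
               [-(3*attr + 3*((attributes.length : Int)-1)*rule + 1),
                -(3*attr + 3*((attributes.length : Int)-1)*rule + 3)],
               [-(3*attr + 3*((attributes.length : Int)-1)*rule + 1),
                 (3*attr + 3*((attributes.length : Int)-1)*rule + 2),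
                -(3*attr + 3*((attributes.length : Int)-1)*rule + 3)],
               [ (3*attr + 3*((attributes.length : Int)-1)*rule + 1),
                -(3*attr + 3*((attributes.length : Int)-1)*rule + 2),
                -(3*attr + 3*((attributes.length : Int)-1)*rule + 3)],
               [-(3*attr + 3*((attributes.length : Int)-1)*rule + 2),
                -(3*attr + 3*((attributes.length : Int)-1)*rule + 3)],
               [ (3*attr + 3*((attributes.length : Int)-1)*rule + 1),
                 (3*attr + 3*((attributes.length : Int)-1)*rule + 2),
                 (3*attr + 3*((attributes.length : Int)-1)*rule + 3)]]) []
    and_list ++ lista_somentes) []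

-- ===== PORT B =====
def pvPatterns : List (List Int) := [[-1,-2],[-1,-3],[-1,2,-3],[1,-2,-3],[-2,-3],[1,2,3]]

def restriction1_alt (rules_num : Int) (attributes : List Int) : List (List Int) :=
  let total := max rules_num 0 * max ((attributes.length : Int) - 1) 0
  (PySem.List.pyRange 0 total 1).foldl (fun out k =>
    let base := 3 * k
    out ++ pvPatterns.map (fun pat =>
      pat.map (fun o => if 0 < o then base + |o| else -(base + |o|)))) []

-- ===== PRECONDITION & SPEC =====
def Spec_restriction1 (rules_num : Int) (attributes : List Int) (out : List (List Int)) : Prop := out = restriction1_alt rules_num attributes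
instance (rules_num : Int) (attributes : List Int) (out : List (List Int)) : Decidable (Spec_restriction1 rules_num attributes out) := by unfold Spec_restriction1; infer_instance

-- ===== CLAIM (what is proved, stated in full; the proofs are below) =====
def Claim_equal_restriction1 : Prop := ∀ (rules_num : Int) (attributes : List Int), Dom_restriction1 rules_num attributes → Spec_restriction1 rules_num attributes (restriction1 rules_num attributes)

-- ===== LEMMAS AND PROOFS =====

-- the six clauses of one block, as a function of the block's base literal index
def pvSix (b : Int) : List (List Int) :=
  [[-(b+1), -(b+2)], [-(b+1), -(b+3)], [-(b+1), (b+2), -(b+3)],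
   [(b+1), -(b+2), -(b+3)], [-(b+2), -(b+3)], [(b+1), (b+2), (b+3)]]

theorem pvPatterns_eval (k : Int) :
    pvPatterns.map (fun pat => pat.map (fun o => if 0 < o then 3*k + |o| else -(3*k + |o|)))
      = pvSix (3*k) := by
  norm_num [pvPatterns, pvSix]

-- A as a flatMap over the nested ranges
theorem restriction1_eq_flatMap (rules_num : Int) (attributes : List Int) :
    restriction1 rules_num attributes =
      (PySem.List.pyRange 0 rules_num 1).flatMap (fun rule =>
        (PySem.List.pyRange 0 ((attributes.length : Int) - 1) 1).flatMap (fun attr =>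
          pvSix (3*(((attributes.length : Int) - 1)*rule + attr)))) := by
  unfold restriction1
  simp only [PySem.List.foldl_append_eq_flatMap, List.nil_append]
  congr 1; funext rule; congr 1; funext attr
  have hb : 3*((((attributes.length : Int)) - 1)*rule + attr)
      = 3*attr + 3*((attributes.length : Int)-1)*rule := by ring
  rw [hb]; rfl

-- B as a flatMap over the flat range
theorem restriction1_alt_eq_flatMap (rules_num : Int) (attributes : List Int) :
    restriction1_alt rules_num attributes =
      (PySem.List.pyRange 0 (max rules_num 0 * max ((attributes.length : Int) - 1) 0) 1).flatMap
        (fun k => pvSix (3*k)) := by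
  unfold restriction1_alt
  simp only [PySem.List.foldl_append_eq_flatMap, List.nil_append, pvPatterns_eval]

-- the range-product bijection, over Nat indices
theorem pvNest (R M : Nat) (g : Int → List (List Int)) :
    (PySem.List.pyRange 0 (R : Int) 1).flatMap (fun rule =>
      (PySem.List.pyRange 0 (M : Int) 1).flatMap (fun attr => g ((M : Int)*rule + attr)))
    = (PySem.List.pyRange 0 ((R : Int) * (M : Int)) 1).flatMap g := by
  induction R with
  | zero => simp [PySem.List.pyRange_one_eq_nil]
  | succ r ih =>
    have h1 : ((r+1 : Nat) : Int) = (r : Int) + 1 := by push_cast; ring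
    rw [h1, PySem.List.pyRange_one_succ_right (by positivity), List.flatMap_append, ih]
    have h2 : ((r : Int) + 1) * (M : Int) = (r : Int) * M + M := by ring
    rw [h2, PySem.List.pyRange_one_append 0 ((r:Int)*M) ((r:Int)*M + M)
          (by positivity) (by omega), List.flatMap_append]
    congr 1
    simp only [List.flatMap_cons, List.flatMap_nil, List.append_nil]
    rw [PySem.List.pyRange_one 0 (M:Int), PySem.List.pyRange_one ((r:Int)*M) ((r:Int)*M + M)]
    have e1 : ((M:Int) - 0).toNat = M := by omega
    have e2 : ((r:Int)*M + M - (r:Int)*M).toNat = M := by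
      have h : ((r:Int)*M + M - (r:Int)*M) = (M:Int) := by ring
      rw [h]; omega
    rw [e1, e2, List.flatMap_map, List.flatMap_map]
    congr 1; funext k
    congr 1; ring

theorem restriction1_spec' (rules_num : Int) (attributes : List Int) :
    restriction1 rules_num attributes = restriction1_alt rules_num attributes := by
  rw [restriction1_eq_flatMap, restriction1_alt_eq_flatMap]
  generalize (attributes.length : Int) - 1 = m
  by_cases hr : rules_num ≤ 0
  · rw [PySem.List.pyRange_one_eq_nil hr,
        show max rules_num 0 * max m 0 = 0 * max m 0 from by rw [max_eq_right hr], zero_mul]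
    simp [PySem.List.pyRange_one_eq_nil]
  by_cases hM : m ≤ 0
  · rw [show max rules_num 0 * max m 0 = max rules_num 0 * 0 from by rw [max_eq_right hM], mul_zero]
    simp [PySem.List.pyRange_one_eq_nil le_rfl, PySem.List.pyRange_one_eq_nil hM]
  obtain ⟨R, rfl⟩ := Int.eq_ofNat_of_zero_le (by omega : (0:Int) ≤ rules_num)
  obtain ⟨M, rfl⟩ := Int.eq_ofNat_of_zero_le (by omega : (0:Int) ≤ m)
  rw [show max ((R:Int)) 0 = (R:Int) from by omega,
      show max ((M:Int)) 0 = (M:Int) from by omega]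
  exact pvNest R M (fun k => pvSix (3*k))

-- ===== VERDICT (by name: the statement is the Claim_ definition above) =====
theorem restriction1_spec : Claim_equal_restriction1 := by
  intro rules_num attributes _
  exact restriction1_spec' rules_num attributes
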